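-- pv_equiv track=rewrite | github.com/hsn8086/exam | codeforces/ungrouped/cf2024b.py | solve
-- ===== SOURCE A (Python) =====
-- def solve(n, k, a):
--     a = list(a)
--     a.sort(reverse=True)
--     count = 0
--     height = 0
--     while k > 0:
--         if k > (a[-1] - height) * len(a):
--             k -= (a[-1] - height) * len(a)
--             count += (a[-1] - height) * len(a)
--             height = a[-1]
--             while a[-1] == height:
--                 count += 1
--                 a.pop(-1)
--
--         else:
--             count += k
--             k = 0
--     return count
-- ===== SOURCE B (Python) =====
-- def solve(n, k, a):
--     # Closed-form characterization: sort ascending; a column of height h is fully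
--     # mined out iff k exceeds cap(h) = sum(min(x, h) for x in a), and the answer
--     # is k plus the number of mined-out columns.  cap for the i-th sorted element
--     # is prefix-sum(i+1) + h * (remaining after i), computed in one pass.
--     if k <= 0:
--         return 0
--     extra = 0
--     prefix = 0
--     rem = len(a)
--     for h in sorted(a):
--         prefix += h
--         rem -= 1
--         if k > prefix + h * rem:
--             extra += 1
--     return k + extra
-- ===== Notes on version B (the rewrite author's own statement) =====
-- stated objective: simpler
-- what changed: Replaces A's mutating band-by-band while-loop (repeatedly shaving (a[-1]-height)*len(a) blocks and popping exhausted columns) by a closed-form characterization: the answer is k plus the number of columns whose mining capacity sum(min(x,h) for x in a) is below k, counted in one prefix-sum pass over the ascending sort.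
import Mathlib
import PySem

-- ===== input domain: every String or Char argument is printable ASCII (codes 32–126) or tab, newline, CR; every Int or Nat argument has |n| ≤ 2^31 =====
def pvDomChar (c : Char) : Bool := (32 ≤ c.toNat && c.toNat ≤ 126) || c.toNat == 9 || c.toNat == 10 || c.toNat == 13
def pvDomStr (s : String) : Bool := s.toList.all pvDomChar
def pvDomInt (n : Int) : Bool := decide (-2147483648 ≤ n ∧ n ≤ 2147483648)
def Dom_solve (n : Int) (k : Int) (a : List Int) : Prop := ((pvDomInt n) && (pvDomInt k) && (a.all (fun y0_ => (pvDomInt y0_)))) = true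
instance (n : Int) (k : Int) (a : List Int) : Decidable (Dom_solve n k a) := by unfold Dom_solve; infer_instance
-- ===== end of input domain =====

-- B replaces A's mutating band-by-band while loop by a closed-form count: the answer is
-- k plus the number of columns whose capacity sum(min(x,h)) is below k, found in one
-- prefix-sum pass over the ascending sort; return values agree wherever A returns.

-- ===== PORT A =====
-- inner loop `while a[-1] == height: count += 1; a.pop(-1)` ; none = IndexError
def solveAPop (a : List Int) (height : Int) (count : Int) : Option (List Int × Int) :=
  match PySem.List.pyGet? a (-1) with
  | none => none                                   -- a[-1] on empty: IndexError
  | some x =>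
    if x = height then
      match h2 : PySem.List.pop? a (-1) with       -- a.pop(-1)
      | none => none                               -- unreachable: a ≠ []
      | some (_, rest) => solveAPop rest height (count + 1)
    else some (a, count)
termination_by a.length
decreasing_by
  have h3 := PySem.List.length_of_pop?_eq_some a h2
  simp at h3 ⊢
  omega

theorem solveAPop_length_le : ∀ (a : List Int) (h c : Int) (r : List Int × Int),
    solveAPop a h c = some r → r.1.length ≤ a.length := by
  suffices H : ∀ (N : Nat) (a : List Int), a.length ≤ N → ∀ (h c : Int) (r : List Int × Int),
      solveAPop a h c = some r → r.1.length ≤ a.length by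
    intro a h c r heq; exact H a.length a le_rfl h c r heq
  intro N
  induction N with
  | zero =>
    intro a ha h c r heq
    have hnil : a = [] := List.eq_nil_of_length_eq_zero (by omega)
    subst hnil
    rw [solveAPop.eq_def] at heq
    simp [PySem.List.pyGet?_neg_one] at heq
  | succ N ihN =>
    intro a ha h c r heq
    rw [solveAPop.eq_def] at heq
    split at heq
    · simp at heq
    · split at heq
      · split at heq
        · simp at heq
        · rename_i x hget hx y rest hpop
          have hlen := PySem.List.length_of_pop?_eq_some a hpop
          simp at hlen
          have := ihN rest (by omega) h (c + 1) r heq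
          omega
      · rename_i x hget hx
        have hr := Option.some.inj heq
        subst hr
        simp

theorem solveAPop_length_lt (a : List Int) (h c : Int) (r : List Int × Int)
    (hlast : a.getLast? = some h) (heq : solveAPop a h c = some r) :
    r.1.length < a.length := by
  have hne : a ≠ [] := by intro hnil; subst hnil; simp at hlast
  have hpop : PySem.List.pop? a (-1) = some (a.getLast hne, a.dropLast) := by
    conv_lhs => rw [← List.dropLast_concat_getLast hne]
    rw [PySem.List.pop?_last]
  rw [solveAPop.eq_def] at heq
  rw [PySem.List.pyGet?_neg_one, hlast] at heq
  split at heq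
  · cases heq
  · rename_i x hx
    have hxh : h = x := Option.some.inj hx
    subst hxh
    rw [if_pos rfl] at heq
    split at heq
    · cases heq
    · rename_i y rest hp2
      rw [hpop] at hp2
      have hrest : rest = a.dropLast :=
        (congrArg Prod.snd (Option.some.inj hp2)).symm
      have h1 := solveAPop_length_le rest h (c + 1) r heq
      have h3 : 0 < a.length := List.length_pos_iff.mpr hne
      have h4 : a.dropLast.length = a.length - 1 := by simp
      subst hrest
      omega

-- outer `while k > 0:` loop of A, over the reverse-sorted list
def solveALoop (a : List Int) (k : Int) (count : Int) (height : Int) : Int :=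
  if k > 0 then
    match h1 : PySem.List.pyGet? a (-1) with
    | none => 0                                    -- a[-1] on empty: IndexError
    | some last =>
      if k > (last - height) * PySem.List.len a then
        match h2 : solveAPop a last (count + (last - height) * PySem.List.len a) with
        | none => 0                                -- IndexError inside the inner loop
        | some (a', count') =>
          solveALoop a' (k - (last - height) * PySem.List.len a) count' last
      else count + k
  else count
termination_by a.length
decreasing_by
  rw [PySem.List.pyGet?_neg_one] at h1
  exact solveAPop_length_lt a last _ _ h1 h2

def solve (n : Int) (k : Int) (a : List Int) : Int :=
  -- a = list(a); a.sort(reverse=True)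
  solveALoop (PySem.List.sorted a (fun x => x) true) k 0 0

-- ===== PORT B =====
-- `for h in sorted(a): prefix += h; rem -= 1; if k > prefix + h*rem: extra += 1`
def solve_alt (n : Int) (k : Int) (a : List Int) : Int :=
  if k ≤ 0 then 0
  else
    let st := (PySem.List.sorted a (fun x => x) false).foldl
      (fun (st : Int × Int × Int) h =>
        (st.1 + (if k > (st.2.1 + h) + h * (st.2.2 - 1) then 1 else 0),
         st.2.1 + h, st.2.2 - 1))
      (0, 0, PySem.List.len a)
    k + st.1

-- ===== PRECONDITION & SPEC =====
-- Pre_ holds exactly where the Python A returns: A raises IndexError (it runs out of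
-- columns while k is still positive) iff k > 0 and k > sum(a).
def Pre_solve (n : Int) (k : Int) (a : List Int) : Prop :=
  k ≤ 0 ∨ (a ≠ [] ∧ k ≤ a.sum)
instance (n : Int) (k : Int) (a : List Int) : Decidable (Pre_solve n k a) := by
  unfold Pre_solve; infer_instance

def pvWitness_solve : Int × Int × List Int := (3, 4, [2, 2, 3])

def Spec_solve (n : Int) (k : Int) (a : List Int) (out : Int) : Prop := out = solve_alt n k a
instance (n : Int) (k : Int) (a : List Int) (out : Int) : Decidable (Spec_solve n k a out) := by unfold Spec_solve; infer_instance

-- ===== CLAIM (what is proved, stated in full; the proofs are below) =====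
def Claim_equal_solve : Prop := ∀ (n : Int) (k : Int) (a : List Int), Dom_solve n k a → Pre_solve n k a → Spec_solve n k a (solve n k a)

-- ===== LEMMAS AND PROOFS =====

-- number of sorted positions whose capacity (prefix + h + h*(rem-1)) is below K
def capCount (s : List Int) (K P rem : Int) : Int :=
  match s with
  | [] => 0
  | h :: t => (if K > P + h + h * (rem - 1) then 1 else 0) + capCount t K (P + h) (rem - 1)

-- B's fold computes capCount in its first component
theorem pv_foldB (k : Int) : ∀ (s : List Int) (extra P rem : Int),
    (s.foldl
      (fun (st : Int × Int × Int) h =>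
        (st.1 + (if k > (st.2.1 + h) + h * (st.2.2 - 1) then 1 else 0),
         st.2.1 + h, st.2.2 - 1))
      (extra, P, rem)).1 = extra + capCount s k P rem := by
  intro s
  induction s with
  | nil => intro extra P rem; simp [capCount]
  | cons h t ih =>
    intro extra P rem
    simp only [List.foldl_cons, capCount, ih]
    ring

-- all capacities vanish once K is at most the capacity at the minimum height
theorem capCount_zero : ∀ (s : List Int) (K P rem h0 : Int),
    s.Pairwise (· ≤ ·) → rem = (s.length : Int) → (∀ x ∈ s, h0 ≤ x) →
    K ≤ P + h0 * rem → capCount s K P rem = 0 := by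
  intro s
  induction s with
  | nil => intro K P rem h0 _ _ _ _; simp [capCount]
  | cons x t ih =>
    intro K P rem h0 hs hrem hmin hK
    have hx : h0 ≤ x := hmin x (by simp)
    have hrem0 : (0 : Int) ≤ rem := by simp [hrem]; positivity
    have hcap : K ≤ P + x + x * (rem - 1) := by nlinarith
    rw [capCount, if_neg (not_lt.mpr hcap)]
    have ht := ih K (P + x) (rem - 1) x (List.pairwise_cons.mp hs).2
      (by simp at hrem ⊢; omega) (fun y hy => (List.pairwise_cons.mp hs).1 y hy)
      (by nlinarith)
    omega

-- capCount over the minimal group: each of the m copies of h counts once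
theorem capCount_replicate : ∀ (m : Nat) (h : Int) (t : List Int) (K P rem : Int),
    K > P + h * rem → rem = (m : Int) + (t.length : Int) →
    capCount (List.replicate m h ++ t) K P rem =
      (m : Int) + capCount t K (P + (m : Int) * h) (t.length : Int) := by
  intro m
  induction m with
  | zero =>
    intro h t K P rem _ hrem
    simp at hrem
    simp [hrem]
  | succ m ih =>
    intro h t K P rem hK hrem
    rw [List.replicate_succ, List.cons_append, capCount,
      if_pos (by nlinarith)]
    rw [ih h t K (P + h) (rem - 1) (by nlinarith) (by push_cast at hrem ⊢; omega)]
    have : P + h + (m : Int) * h = P + ((m : Nat) + 1 : Int) * h := by push_cast; ring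
    rw [this]
    push_cast
    ring

-- an ascending list whose minimum is h splits as copies of h followed by strictly larger elements
theorem pv_sorted_split (s : List Int) (h : Int) (hs : s.Pairwise (· ≤ ·))
    (hmin : ∀ x ∈ s, h ≤ x) :
    s = List.replicate (s.count h) h ++ s.filter (· ≠ h) ∧
      ∀ x ∈ s.filter (· ≠ h), h < x := by
  induction s with
  | nil => simp
  | cons x s' ih =>
    have hx : h ≤ x := hmin x (by simp)
    have hs' := (List.pairwise_cons.mp hs).2
    have hxall := (List.pairwise_cons.mp hs).1
    by_cases hxh : x = h
    · subst hxh
      obtain ⟨h1, h2⟩ := ih hs' (fun y hy => hmin y (by simp [hy]))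
      constructor
      · simp only [List.count_cons_self, List.filter_cons]
        simp only [show (¬(x = x)) = False by simp, decide_false]
        simp only [List.replicate_succ]
        conv_lhs => rw [h1]
        simp
      · intro y hy
        simp only [List.filter_cons] at hy
        simp at hy
        exact h2 y (by simp [List.mem_filter]; tauto)
    · have hlt : h < x := lt_of_le_of_ne hx (Ne.symm hxh)
      have hall : ∀ y ∈ s', y ≠ h := fun y hy => by
        have := hxall y hy; omega
      have hc : s'.count h = 0 := List.count_eq_zero.mpr (fun hmem => hall h hmem rfl)
      have hf : s'.filter (· ≠ h) = s' := List.filter_eq_self.mpr (by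
        intro y hy; simpa using hall y hy)
      have hf' : List.filter (fun y => !decide (y = h)) s' = s' :=
        List.filter_eq_self.mpr (by intro y hy; simpa using hall y hy)
      constructor
      · simp [hxh, hc, hf']
      · intro y hy
        simp only [List.filter_cons, show (decide (x ≠ h)) = true by simp [hxh]] at hy
        rw [hf] at hy
        rcases List.mem_cons.mp hy with rfl | hy'
        · exact hlt
        · exact lt_of_lt_of_le hlt (hxall y hy')

-- A's inner pop loop on the reverse of (replicate m h ++ t): pops exactly the m copies
theorem pv_solveAPop_spec (m : Nat) (h : Int) (t : List Int) (c : Int)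
    (ht : ∀ x ∈ t, h < x) :
    solveAPop (List.replicate m h ++ t).reverse h c =
      (if t = [] then none else some (t.reverse, c + (m : Int))) := by
  induction m generalizing c with
  | zero =>
    simp only [List.replicate_zero, List.nil_append]
    rw [solveAPop.eq_def]
    rw [PySem.List.pyGet?_neg_one, List.getLast?_reverse]
    cases t with
    | nil => simp
    | cons x xs =>
      have hlt : h < x := ht x (by simp)
      simp only [List.head?_cons]
      rw [if_neg (by omega), if_neg (by simp)]
      simp
  | succ m ih =>
    have hget : PySem.List.pyGet? (List.replicate (m+1) h ++ t).reverse (-1) = some h := by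
      rw [PySem.List.pyGet?_neg_one, List.getLast?_reverse]
      simp [List.replicate_succ]
    have hpop : PySem.List.pop? (List.replicate (m+1) h ++ t).reverse (-1) =
        some (h, (List.replicate m h ++ t).reverse) := by
      rw [show (List.replicate (m+1) h ++ t).reverse =
            (List.replicate m h ++ t).reverse ++ [h] by simp [List.replicate_succ]]
      rw [PySem.List.pop?_last]
    rw [solveAPop.eq_def]
    split
    · rename_i hx
      rw [hget] at hx
      cases hx
    · rename_i x hx
      rw [hget] at hx
      have hxh : h = x := Option.some.inj hx
      subst hxh
      rw [if_pos rfl]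
      split
      · rename_i hp
        rw [hpop] at hp
        cases hp
      · rename_i y rest hp
        rw [hpop] at hp
        have hrest : rest = (List.replicate m h ++ t).reverse :=
          (congrArg Prod.snd (Option.some.inj hp)).symm
        subst hrest
        rw [ih (c + 1)]
        by_cases htc : t = []
        · rw [if_pos htc, if_pos htc]
        · rw [if_neg htc, if_neg htc]
          have : c + 1 + (m : Int) = c + ((m : Nat) + 1 : Int) := by push_cast; ring
          rw [this]
          push_cast
          ring_nf

-- main correspondence: A's loop equals count + k + capCount, by strong induction
theorem pv_mainA : ∀ (N : Nat) (s : List Int), s.length ≤ N →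
    ∀ (K k count height P : Int),
    s.Pairwise (· ≤ ·) →
    k = K - P - height * (s.length : Int) →
    (0 < k → K ≤ P + s.sum) →
    solveALoop s.reverse k count height =
      count + (if 0 < k then k + capCount s K P (s.length : Int) else 0) := by
  intro N
  induction N with
  | zero =>
    intro s hN K k count height P hs hk hcap
    have hnil : s = [] := List.eq_nil_of_length_eq_zero (by omega)
    subst hnil
    simp at hk
    by_cases hk0 : 0 < k
    · exfalso; have := hcap hk0; simp at this; omega
    · rw [solveALoop.eq_def, if_neg (by omega), if_neg hk0]
      omega
  | succ N ihN =>
    intro s hN K k count height P hs hk hcap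
    by_cases hk0 : 0 < k
    · have hKcap := hcap hk0
      have hne : s ≠ [] := by
        intro hnil; subst hnil; simp at hk hKcap; omega
      set x0 : Int := s.head hne with hx0
      have hhead : s = x0 :: s.tail := by
        rw [hx0]
        cases s with
        | nil => exact absurd rfl hne
        | cons x l => rfl
      have hmin : ∀ y ∈ s, x0 ≤ y := by
        intro y hy
        conv at hs => rw [hhead]
        conv at hy => rw [hhead]
        rcases List.mem_cons.mp hy with rfl | hy'
        · exact le_rfl
        · exact (List.pairwise_cons.mp hs).1 y hy'
      obtain ⟨hsplit, htgt⟩ := pv_sorted_split s x0 hs hmin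
      set m : Nat := s.count x0 with hm
      set t : List Int := s.filter (· ≠ x0) with htdef
      have hmpos : 0 < m := by
        rw [hm]
        refine List.count_pos_iff.mpr ?_
        conv_lhs => rw [hhead]
        exact List.mem_cons_self ..
      have hslen : s.length = m + t.length := by
        conv_lhs => rw [hsplit]
        simp
      have hssum : s.sum = (m : Int) * x0 + t.sum := by
        conv_lhs => rw [hsplit]
        simp [List.sum_replicate, mul_comm]
      set rem : Int := (s.length : Int) with hremdef
      have hget : PySem.List.pyGet? s.reverse (-1) = some x0 := by
        rw [PySem.List.pyGet?_neg_one, List.getLast?_reverse]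
        conv_lhs => rw [hhead]
        rfl
      have hlen : PySem.List.len s.reverse = rem := by
        simp [PySem.List.len_eq, hremdef]
      rw [solveALoop.eq_def, if_pos (by omega)]
      split
      · rename_i hx; rw [hget] at hx; cases hx
      · rename_i last hx
        rw [hget] at hx
        have hxl : x0 = last := Option.some.inj hx
        rw [← hxl, hlen]
        have hband : ((x0 - height) * rem) = x0 * rem - height * rem := by ring
        by_cases hstage : k > (x0 - height) * rem
        · rw [if_pos hstage]
          have hKgt : K > P + x0 * rem := by
            rw [hband] at hstage; linarith
          have htne : t ≠ [] := by
            intro htnil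
            rw [htnil] at hssum hslen
            simp at hssum hslen
            have h1 : x0 * rem = (m : Int) * x0 := by
              rw [hremdef, hslen]; push_cast; ring
            rw [h1] at hKgt
            rw [hssum] at hKcap
            linarith
          have hpop0 := pv_solveAPop_spec m x0 t (count + (x0 - height) * rem) htgt
          rw [← hsplit, if_neg htne] at hpop0
          split
          · rename_i hp; rw [hpop0] at hp; cases hp
          · rename_i a' count' hp
            rw [hpop0] at hp
            have ha' : a' = t.reverse := (congrArg Prod.fst (Option.some.inj hp)).symm
            have hc' : count' = count + (x0 - height) * rem + (m : Int) :=
              (congrArg Prod.snd (Option.some.inj hp)).symm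
            subst ha'
            set P' : Int := P + (m : Int) * x0 with hP'
            set k' : Int := k - (x0 - height) * rem with hk'
            have hk'pos : 0 < k' := by rw [hk', hband]; linarith
            have hk'inv : k' = K - P' - x0 * (t.length : Int) := by
              rw [hk', hband, hk, hP', hremdef]
              have : x0 * (s.length : Int) = x0 * (m : Int) + x0 * (t.length : Int) := by
                rw [hslen]; push_cast; ring
              rw [this]; ring
            have htpw : t.Pairwise (· ≤ ·) := hs.sublist (htdef ▸ List.filter_sublist)
            have hrec := ihN t (by omega) K k' count' x0 P' htpw hk'inv
              (fun _ => by rw [hP']; linarith)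
            rw [hrec, if_pos hk'pos]
            have hcc : capCount s K P rem = (m : Int) + capCount t K P' (t.length : Int) := by
              conv_lhs => rw [hsplit]
              rw [capCount_replicate m x0 t K P rem hKgt (by rw [hremdef, hslen]; push_cast; ring)]
            rw [if_pos hk0, hcc, hc', hk']
            ring
        · rw [if_neg hstage]
          have hKle : K ≤ P + x0 * rem := by
            rw [hband] at hstage; linarith
          have hcz : capCount s K P rem = 0 :=
            capCount_zero s K P rem x0 hs rfl hmin hKle
          rw [if_pos hk0, hcz]
          ring
    · rw [solveALoop.eq_def, if_neg (by omega), if_neg hk0]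
      omega

-- ===== VERDICT (by name: the statement is the Claim_ definition above) =====
theorem solve_spec : Claim_equal_solve := by
  unfold Claim_equal_solve
  intro n k a _ hpre
  unfold Spec_solve solve solve_alt
  set r := PySem.List.sorted a (fun x => x) true with hr
  have hperm : r.Perm a := PySem.List.sorted_perm a _ _
  have hs1 : r.reverse.Pairwise (· ≤ ·) := by
    rw [List.pairwise_reverse]
    exact PySem.List.sorted_pairwise_rev a _
  set s : List Int := r.reverse with hsdef
  have hsperm : s.Perm a := (List.reverse_perm r).trans hperm
  have hseq : PySem.List.sorted a (fun x => x) false = s :=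
    PySem.List.sorted_id_eq_of_perm_of_pairwise a s hsperm hs1
  have hrr : r = s.reverse := by rw [hsdef, List.reverse_reverse]
  have hmain := pv_mainA s.length s le_rfl k k 0 0 0 hs1
    (by simp) (by
      intro hkpos
      rcases hpre with hk0 | ⟨hne, hsum⟩
      · omega
      · simp [hsperm.sum_eq]; omega)
  rw [hrr, hmain]
  rw [hseq]
  by_cases hk0 : 0 < k
  · rw [if_pos hk0, if_neg (by omega)]
    show 0 + (k + capCount s k 0 ((s.length : Nat) : Int)) =
      k + ((List.foldl (fun (st : Int × Int × Int) h =>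
        (st.1 + (if k > (st.2.1 + h) + h * (st.2.2 - 1) then 1 else 0),
         st.2.1 + h, st.2.2 - 1)) ((0 : Int), (0 : Int), PySem.List.len a) s).1)
    rw [pv_foldB k s 0 0 (PySem.List.len a)]
    simp only [PySem.List.len_eq, hsperm.length_eq]
    ring
  · rw [if_neg hk0, if_pos (by omega)]
    simp
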